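-- pv_equiv track=rewrite | github.com/Fonntyy/AlgorithmsExam | exam_exercises/285.py | better_algo_x
-- ===== SOURCE A (Python) =====
-- def better_algo_x(A, B):
--     i = 0
--     j = 0
--     best_length = 0
--     while j < len(A):
--         if A[j] > B[j]:
--             curr_length = j - i + 1
--             if curr_length > best_length:
--                 best_length = curr_length
--             j = j + 1
--         else:
--             i = j = j + 1
--     return best_length
-- ===== SOURCE B (Python) =====
-- def better_algo_x(A, B):
--     # Two-phase: build the comparison table, then run-length-encode it and take the max.
--     flags = [A[j] > B[j] for j in range(len(A))]
--     lengths = []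
--     k = 0
--     n = len(flags)
--     while k < n:
--         if flags[k]:
--             m = k
--             while m < n and flags[m]:
--                 m += 1
--             lengths.append(m - k)
--             k = m
--         else:
--             k += 1
--     return max(lengths, default=0)
-- ===== Notes on version B (the rewrite author's own statement) =====
-- stated objective: alternative
-- what changed: Replaces A's single two-pointer while loop (run-start index i, scan index j) with a two-phase pass: first build the boolean table flags[j] = A[j] > B[j], then run-length-encode the table and return the maximum run length (default 0).
import Mathlib
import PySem

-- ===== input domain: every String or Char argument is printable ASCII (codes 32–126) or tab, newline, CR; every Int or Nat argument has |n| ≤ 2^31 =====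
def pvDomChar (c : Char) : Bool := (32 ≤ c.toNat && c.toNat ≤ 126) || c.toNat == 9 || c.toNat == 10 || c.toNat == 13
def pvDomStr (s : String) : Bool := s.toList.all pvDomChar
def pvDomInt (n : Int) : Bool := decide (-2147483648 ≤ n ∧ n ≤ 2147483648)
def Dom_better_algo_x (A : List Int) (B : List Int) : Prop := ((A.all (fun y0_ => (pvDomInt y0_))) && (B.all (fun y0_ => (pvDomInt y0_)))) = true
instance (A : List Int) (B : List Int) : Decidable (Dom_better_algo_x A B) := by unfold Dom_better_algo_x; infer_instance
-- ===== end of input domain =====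

-- B replaces A's single two-pointer pass by a comparison table followed by a run-length
-- encoding pass whose maximum run is returned (objective: alternative decomposition).

-- ===== PORT A =====
-- A's while loop: i, j are the run start / scan positions, best_length the running answer.
-- `A[j]` / `B[j]` are in range on every admitted input (Pre_ below), so `(pyGet? · j).getD 0`
-- is exact there.
def better_algo_x_go (A : List Int) (B : List Int) (i j : Nat) (best : Int) : Int :=
  if _h : j < A.length then
    if (PySem.List.pyGet? A (j : Int)).getD 0 > (PySem.List.pyGet? B (j : Int)).getD 0 then
      -- curr_length = j - i + 1, inlined
      better_algo_x_go A B i (j + 1)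
        (if (j : Int) - (i : Int) + 1 > best then (j : Int) - (i : Int) + 1 else best)
    else
      better_algo_x_go A B (j + 1) (j + 1) best
  else best
  termination_by A.length - j

def better_algo_x (A : List Int) (B : List Int) : Int :=
  better_algo_x_go A B 0 0 0

-- ===== PORT B =====
-- the inner `while m < n and flags[m]` scan of Source B: the run is the leading block of `true`s
def better_algo_x_runs : List Bool → List Nat
  | [] => []
  | false :: rest => better_algo_x_runs rest
  | true :: rest =>
      ((rest.takeWhile id).length + 1) :: better_algo_x_runs (rest.dropWhile id)
  termination_by fs => fs.length
  decreasing_by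
  · simp
  · have := List.length_dropWhile_le id rest; simp; omega

def better_algo_x_alt (A : List Int) (B : List Int) : Int :=
  let flags : List Bool := (PySem.List.pyRange 0 (A.length : Int) 1).map
    (fun j => decide ((PySem.List.pyGet? A j).getD 0 > (PySem.List.pyGet? B j).getD 0))
  let lengths : List Nat := better_algo_x_runs flags
  ((PySem.List.maxD lengths (fun x => x) 0 : Nat) : Int)

-- ===== PRECONDITION & SPEC =====
-- Python A (and B) raise IndexError at B[j] as soon as j reaches len(B) < len(A); exactly
-- those inputs are excluded.
def Pre_better_algo_x (A : List Int) (B : List Int) : Prop := A.length ≤ B.length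
instance (A : List Int) (B : List Int) : Decidable (Pre_better_algo_x A B) := by
  unfold Pre_better_algo_x; infer_instance

def pvWitness_better_algo_x : List Int × List Int := ([3, 1, 5], [2, 2, 4])

def Spec_better_algo_x (A : List Int) (B : List Int) (out : Int) : Prop := out = better_algo_x_alt A B
instance (A : List Int) (B : List Int) (out : Int) : Decidable (Spec_better_algo_x A B out) := by
  unfold Spec_better_algo_x; infer_instance

-- ===== CLAIM (what is proved, stated in full; the proofs are below) =====
def Claim_equal_better_algo_x : Prop := ∀ (A : List Int) (B : List Int), Dom_better_algo_x A B → Pre_better_algo_x A B → Spec_better_algo_x A B (better_algo_x A B)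

-- ===== LEMMAS AND PROOFS =====

-- abstraction of A's loop as a fold over the flag list, carrying cur = j - i
def pvALoop : List Bool → Nat → Nat → Nat
  | [], _, best => best
  | f :: rest, cur, best =>
      if f then pvALoop rest (cur + 1) (max (cur + 1) best)
      else pvALoop rest 0 best

-- maximum run via B's run-length list
def pvMaxRun (fs : List Bool) : Nat := (better_algo_x_runs fs).foldl max 0

theorem pv_foldl_max_cons (l : List Nat) (a b : Nat) :
    List.foldl max (max a b) l = max a (List.foldl max b l) := by
  induction l generalizing b with
  | nil => rfl
  | cons x t ih =>
      simp only [List.foldl]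
      rw [show max (max a b) x = max a (max b x) by omega, ih]

theorem pvMaxRun_eq (gs : List Bool) :
    pvMaxRun gs = max (gs.takeWhile id).length (pvMaxRun (gs.dropWhile id)) := by
  match gs with
  | [] => simp [pvMaxRun, better_algo_x_runs]
  | false :: r => simp [pvMaxRun, List.takeWhile, List.dropWhile]
  | true :: r =>
      simp only [pvMaxRun, better_algo_x_runs, List.takeWhile, List.dropWhile, id_eq,
        List.length_cons, List.foldl]
      rw [show max 0 ((List.takeWhile id r).length + 1) =
        max ((List.takeWhile id r).length + 1) 0 by omega]
      rw [pv_foldl_max_cons]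

theorem pvALoop_eq (fs : List Bool) (cur best : Nat) (h : cur ≤ best) :
    pvALoop fs cur best =
      max best (max (cur + (fs.takeWhile id).length) (pvMaxRun (fs.dropWhile id))) := by
  induction fs generalizing cur best with
  | nil => simp [pvALoop, better_algo_x_runs, pvMaxRun]; omega
  | cons f rest ih =>
      cases f with
      | true =>
          simp only [pvALoop, if_pos, List.takeWhile, List.dropWhile, id_eq, List.length_cons]
          rw [ih (cur + 1) (max (cur + 1) best) (le_max_left _ _)]
          omega
      | false =>
          simp only [pvALoop, List.takeWhile, List.dropWhile, id_eq, Bool.false_eq_true,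
            if_false]
          have hr : pvMaxRun (false :: rest) = pvMaxRun rest := by
            simp [pvMaxRun, better_algo_x_runs]
          rw [ih 0 best (Nat.zero_le _), hr, pvMaxRun_eq rest]
          simp only [List.length_nil, Nat.add_zero, Nat.zero_add]
          omega

theorem pvALoop_maxRun (fs : List Bool) : pvALoop fs 0 0 = pvMaxRun fs := by
  rw [pvALoop_eq fs 0 0 (le_refl _), pvMaxRun_eq fs]; omega

-- the flag list both ports are about
def pvFlags (A B : List Int) : List Bool :=
  (List.range A.length).map
    (fun (k : Nat) =>
      decide ((PySem.List.pyGet? A (k : Int)).getD 0 > (PySem.List.pyGet? B (k : Int)).getD 0))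

theorem pvFlags_alt (A B : List Int) :
    (PySem.List.pyRange 0 (A.length : Int) 1).map
      (fun j => decide ((PySem.List.pyGet? A j).getD 0 > (PySem.List.pyGet? B j).getD 0))
      = pvFlags A B := by
  rw [PySem.List.pyRange_one, List.map_map]
  simp only [Int.sub_zero, Int.toNat_natCast, Function.comp_def, zero_add]
  rfl

theorem pvFlags_getElem (A B : List Int) (k : Nat) (hk : k < A.length) :
    (pvFlags A B)[k]'(by simp [pvFlags]; omega)
      = decide ((PySem.List.pyGet? A (k : Int)).getD 0 > (PySem.List.pyGet? B (k : Int)).getD 0) := by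
  simp only [pvFlags, List.getElem_map, List.getElem_range]


theorem pv_go_eq (A B : List Int) (j i b : Nat) (hij : i ≤ j) (hj : j ≤ A.length) :
    better_algo_x_go A B i j ((b : Nat) : Int) =
      ((pvALoop ((pvFlags A B).drop j) (j - i) b : Nat) : Int) := by
  have hlen : (pvFlags A B).length = A.length := by simp [pvFlags]
  induction hn : A.length - j generalizing i j b with
  | zero =>
      have hj' : ¬ j < A.length := by omega
      rw [better_algo_x_go, dif_neg hj']
      have : (pvFlags A B).drop j = [] := by
        apply List.drop_eq_nil_of_le; omega
      rw [this]; rfl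
  | succ n ih =>
      have hjA : j < A.length := by omega
      have hdrop : (pvFlags A B).drop j =
          (pvFlags A B)[j]'(by omega) :: (pvFlags A B).drop (j + 1) :=
        List.drop_eq_getElem_cons (by omega)
      rw [better_algo_x_go, dif_pos hjA, hdrop, pvFlags_getElem A B j hjA]
      by_cases hc : (PySem.List.pyGet? A (j : Int)).getD 0 > (PySem.List.pyGet? B (j : Int)).getD 0
      · rw [if_pos hc]
        simp only [pvALoop, hc, decide_true, if_true]
        have hbest : (if ((j : Int) - (i : Int) + 1) > ((b : Nat) : Int)
            then ((j : Int) - (i : Int) + 1) else ((b : Nat) : Int))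
            = ((max (j - i + 1) b : Nat) : Int) := by
          split_ifs with hgt
          · have : b < j - i + 1 := by push_cast at hgt; omega
            rw [Nat.max_eq_left (by omega)]; omega
          · have : ¬ b < j - i + 1 := by
              intro hlt; apply hgt; omega
            rw [Nat.max_eq_right (by omega)]
        rw [hbest, ih (j + 1) i (max (j - i + 1) b) (by omega) (by omega) (by omega)]
        congr 2
        omega
      · rw [if_neg hc]
        simp only [pvALoop, hc, decide_false, Bool.false_eq_true, if_false]
        rw [ih (j + 1) (j + 1) b (le_refl _) (by omega) (by omega)]
        congr 2
        omega

theorem pv_maxD_eq_foldl (l : List Nat) :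
    PySem.List.maxD l (fun x => x) 0 = l.foldl max 0 := by
  cases l with
  | nil => rfl
  | cons x t =>
      have h := PySem.List.max?_id_cons x t
      simp only [PySem.List.maxD, h, Option.getD_some]
      rw [show List.foldl max 0 (x :: t) = List.foldl max (max 0 x) t by rfl]
      rw [show max 0 x = x by omega]

-- ===== VERDICT (by name: the statement is the Claim_ definition above) =====
theorem better_algo_x_spec : Claim_equal_better_algo_x := by
  intro A B _hdom _hpre
  unfold Spec_better_algo_x better_algo_x better_algo_x_alt
  rw [pvFlags_alt]
  have h0 : (0 : Int) = ((0 : Nat) : Int) := rfl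
  rw [h0, pv_go_eq A B 0 0 0 (le_refl _) (Nat.zero_le _)]
  simp only [List.drop_zero, Nat.sub_zero]
  rw [pvALoop_maxRun, pv_maxD_eq_foldl]
  rfl
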